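-- pv_equiv track=rewrite | github.com/yohandev/6115-final-project | scripts/meshgen.py | compress_faces
-- ===== SOURCE A (Python) =====
-- def compress_faces(faces):
--     """Compress faces sorted by color, which are converted to rgb565"""
--     # [(i, j, k), ...]
--     indices = []
--     # [(i, rgb565), ...]
--     colors = []
--
--     def rgb565(r, g, b):
--         return (r >> 3, g >> 2, b >> 3)
--
--     for ((r, g, b), triangles) in faces.items():
--         colors.append((len(indices), rgb565(r, g, b)))
--         indices.extend(triangles)
--
--     return indices, colors
-- ===== SOURCE B (Python) =====
-- def compress_faces(faces):
--     """Compress faces sorted by color, which are converted to rgb565"""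
--     groups = [((r >> 3, g >> 2, b >> 3), list(tris))
--               for (r, g, b), tris in faces.items()]
--     offsets = [0]
--     for _, tris in groups:
--         offsets.append(offsets[-1] + len(tris))
--     indices = [i for _, tris in groups for i in tris]
--     colors = [(off, c) for off, (c, _) in zip(offsets, groups)]
--     return indices, colors
-- ===== Notes on version B (the rewrite author's own statement) =====
-- stated objective: alternative
-- what changed: Replaces A's single loop with mutable accumulator state (colors reading len(indices) as an implicit offset) by a staged decomposition: materialize the color/triangle groups once, compute an explicit prefix-sum offset table, then build indices by one flattening comprehension and colors by zipping offsets with groups.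
import Mathlib
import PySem

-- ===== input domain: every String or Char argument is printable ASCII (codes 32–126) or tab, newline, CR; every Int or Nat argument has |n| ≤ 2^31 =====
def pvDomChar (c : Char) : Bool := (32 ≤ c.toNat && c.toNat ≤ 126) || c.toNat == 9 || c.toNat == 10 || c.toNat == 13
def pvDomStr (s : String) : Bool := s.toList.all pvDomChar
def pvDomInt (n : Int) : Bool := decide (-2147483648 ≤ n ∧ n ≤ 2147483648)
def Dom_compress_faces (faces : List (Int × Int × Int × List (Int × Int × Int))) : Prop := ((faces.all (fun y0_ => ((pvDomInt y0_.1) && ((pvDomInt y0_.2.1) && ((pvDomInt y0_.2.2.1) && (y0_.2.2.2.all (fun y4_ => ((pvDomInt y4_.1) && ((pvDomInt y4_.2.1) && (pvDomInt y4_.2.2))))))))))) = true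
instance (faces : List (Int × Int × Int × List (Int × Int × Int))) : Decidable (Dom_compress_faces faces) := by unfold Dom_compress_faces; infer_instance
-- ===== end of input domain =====

-- B restates A's implicit len(indices) offset tracking as an explicit prefix-sum offset
-- table zipped with materialized groups (objective: alternative decomposition, same cost).

-- ===== PORT A =====
-- Python's r >> 3 on ints is floor division by 2^3 (exact for negatives too).
def pvShr (n : Int) (k : Int) : Int := PySem.Int.floordiv n (2 ^ k.toNat)

-- the loop: colors.append((len(indices), rgb565 r g b)); indices.extend(triangles)
def compress_faces (faces : List (Int × Int × Int × List (Int × Int × Int))) : (List (Int × Int × Int)) × (List (Int × (Int × Int × Int))) :=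
  faces.foldl
    (fun st f =>
      (st.1 ++ f.2.2.2,
       st.2 ++ [(((st.1.length : Int)), (pvShr f.1 3, pvShr f.2.1 2, pvShr f.2.2.1 3))]))
    ([], [])

-- ===== PORT B =====
def compress_faces_alt (faces : List (Int × Int × Int × List (Int × Int × Int))) : (List (Int × Int × Int)) × (List (Int × (Int × Int × Int))) :=
  let groups : List ((Int × Int × Int) × List (Int × Int × Int)) :=
    faces.map (fun f => ((pvShr f.1 3, pvShr f.2.1 2, pvShr f.2.2.1 3), f.2.2.2))
  -- offsets.append(offsets[-1] + len(tris)); offsets starts [0] so it is never empty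
  let offsets : List Int :=
    groups.foldl (fun offs g => offs ++ [(offs.getLast?.getD 0) + (g.2.length : Int)]) [0]
  let indices : List (Int × Int × Int) := groups.flatMap (fun g => g.2)
  let colors : List (Int × (Int × Int × Int)) :=
    (offsets.zip groups).map (fun p => (p.1, p.2.1))
  (indices, colors)

-- ===== PRECONDITION & SPEC =====
def Spec_compress_faces (faces : List (Int × Int × Int × List (Int × Int × Int))) (out : (List (Int × Int × Int)) × (List (Int × (Int × Int × Int)))) : Prop := out = compress_faces_alt faces
instance (faces : List (Int × Int × Int × List (Int × Int × Int))) (out : (List (Int × Int × Int)) × (List (Int × (Int × Int × Int)))) : Decidable (Spec_compress_faces faces out) := by unfold Spec_compress_faces; infer_instance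

-- ===== CLAIM (what is proved, stated in full; the proofs are below) =====
def Claim_equal_compress_faces : Prop := ∀ (faces : List (Int × Int × Int × List (Int × Int × Int))), Dom_compress_faces faces → Spec_compress_faces faces (compress_faces faces)

-- ===== LEMMAS AND PROOFS =====

-- canonical colors list: spec gs n = [(n, c1), (n+|t1|, c2), …]
def pvSpecColors (gs : List ((Int × Int × Int) × List (Int × Int × Int))) (n : Int) : List (Int × (Int × Int × Int)) :=
  match gs with
  | [] => []
  | g :: gs => (n, g.1) :: pvSpecColors gs (n + (g.2.length : Int))

-- canonical offsets tail
def pvOffTail (gs : List ((Int × Int × Int) × List (Int × Int × Int))) (n : Int) : List Int :=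
  match gs with
  | [] => []
  | g :: gs => (n + (g.2.length : Int)) :: pvOffTail gs (n + (g.2.length : Int))

lemma foldA_eq (gs : List ((Int × Int × Int) × List (Int × Int × Int)))
    (step : (List (Int × Int × Int)) × (List (Int × (Int × Int × Int))) →
            ((Int × Int × Int) × List (Int × Int × Int)) →
            (List (Int × Int × Int)) × (List (Int × (Int × Int × Int))))
    (hstep : ∀ st g, step st g = (st.1 ++ g.2, st.2 ++ [((st.1.length : Int), g.1)]))
    (ind : List (Int × Int × Int)) (col : List (Int × (Int × Int × Int))) :
    gs.foldl step (ind, col)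
      = (ind ++ gs.flatMap (fun g => g.2), col ++ pvSpecColors gs (ind.length : Int)) := by
  induction gs generalizing ind col with
  | nil => simp [pvSpecColors]
  | cons g gs ih =>
    simp only [List.foldl_cons, hstep]
    rw [ih]
    simp [pvSpecColors, List.flatMap_cons, List.append_assoc]

lemma foldOff_eq (gs : List ((Int × Int × Int) × List (Int × Int × Int)))
    (pre : List Int) (n : Int) :
    gs.foldl (fun offs g => offs ++ [(offs.getLast?.getD 0) + (g.2.length : Int)]) (pre ++ [n])
      = (pre ++ [n]) ++ pvOffTail gs n := by
  induction gs generalizing pre n with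
  | nil => simp [pvOffTail]
  | cons g gs ih =>
    simp only [List.foldl_cons]
    have hl : (pre ++ [n]).getLast?.getD 0 = n := by simp
    rw [hl]
    have := ih (pre ++ [n]) (n + (g.2.length : Int))
    simp only [List.append_assoc, List.singleton_append] at this ⊢
    rw [show pre ++ n :: [n + (g.2.length : Int)] = (pre ++ [n]) ++ [n + (g.2.length : Int)] by simp]
    rw [ih (pre ++ [n]) (n + (g.2.length : Int))]
    simp [pvOffTail]

lemma zipOff_eq (gs : List ((Int × Int × Int) × List (Int × Int × Int))) (n : Int) :
    ((n :: pvOffTail gs n).zip gs).map (fun p => (p.1, p.2.1)) = pvSpecColors gs n := by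
  induction gs generalizing n with
  | nil => simp [pvSpecColors]
  | cons g gs ih => simp [pvOffTail, pvSpecColors, ih]

-- ===== VERDICT (by name: the statement is the Claim_ definition above) =====
theorem compress_faces_spec : Claim_equal_compress_faces := by
  intro faces _
  unfold Spec_compress_faces compress_faces compress_faces_alt
  set gs := faces.map (fun f => ((pvShr f.1 3, pvShr f.2.1 2, pvShr f.2.2.1 3), f.2.2.2)) with hgs
  -- A's fold over faces is the same fold over gs
  have hA : faces.foldl
      (fun st f =>
        (st.1 ++ f.2.2.2,
         st.2 ++ [(((st.1.length : Int)), (pvShr f.1 3, pvShr f.2.1 2, pvShr f.2.2.1 3))]))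
      ([], [])
      = gs.foldl (fun st g => (st.1 ++ g.2, st.2 ++ [((st.1.length : Int), g.1)])) ([], []) := by
    rw [hgs, List.foldl_map]
  rw [hA, foldA_eq gs _ (fun st g => rfl) [] []]
  have hoff := foldOff_eq gs [] 0
  simp only [List.nil_append] at hoff
  simp only [hoff]
  have hz := zipOff_eq gs 0
  simp only [List.singleton_append]
  simp [hz]
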